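-- pv_equiv track=rewrite | github.com/Michael98CN/EpiVLMs | code/post_processing.py | remove_short_spikes
-- ===== SOURCE A (Python) =====
-- def remove_short_spikes(preds, min_duration=2):
--     """
--     Minimum duration filter to remove transient false positives.
--     Flips contiguous '1's to '0's if their length is less than min_duration.
--     """
--     smoothed = list(preds)
--     n = len(smoothed)
--     i = 0
--
--     while i < n:
--         if smoothed[i] == 1:
--             start = i
--             while i < n and smoothed[i] == 1:
--                 i += 1
--             end = i
--
--             if (end - start) < min_duration:
--                 for j in range(start, end):
--                     smoothed[j] = 0
--         else:
--             i += 1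
--
--     return smoothed
-- ===== SOURCE B (Python) =====
-- def remove_short_spikes(preds, min_duration=2):
--     """Run-length encode, then rebuild: short 1-runs decode as zeros."""
--     runs = []
--     for v in preds:
--         if runs and runs[-1][0] == v:
--             runs[-1][1] += 1
--         else:
--             runs.append([v, 1])
--     out = []
--     for v, k in runs:
--         out.extend([0] * k if v == 1 and k < min_duration else [v] * k)
--     return out
-- ===== Notes on version B (the rewrite author's own statement) =====
-- stated objective: alternative
-- what changed: B builds a run-length encoding of the whole sequence in one pass and then decodes it, emitting zeros for 1-runs shorter than min_duration, instead of A's in-place scan that mutates a copy by index with start/end/while bookkeeping.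
import Mathlib
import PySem

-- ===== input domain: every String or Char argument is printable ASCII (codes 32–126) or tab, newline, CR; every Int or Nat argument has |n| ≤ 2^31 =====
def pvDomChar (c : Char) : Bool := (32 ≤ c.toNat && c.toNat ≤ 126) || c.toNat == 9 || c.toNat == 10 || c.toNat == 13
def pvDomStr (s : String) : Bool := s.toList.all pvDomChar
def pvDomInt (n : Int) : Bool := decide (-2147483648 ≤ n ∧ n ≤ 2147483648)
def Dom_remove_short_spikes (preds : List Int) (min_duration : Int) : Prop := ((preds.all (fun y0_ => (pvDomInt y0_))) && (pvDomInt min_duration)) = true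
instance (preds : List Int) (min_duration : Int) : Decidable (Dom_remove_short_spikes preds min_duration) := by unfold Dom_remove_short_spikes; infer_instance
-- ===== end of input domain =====

-- B rebuilds the output from a run-length encoding instead of A's in-place index surgery; objective: alternative (same cost).

-- ===== PORT A =====
-- inner `while i < n and smoothed[i] == 1: i += 1`
def rssWhileOnes (s : List Int) (i : Nat) : Nat :=
  if i < s.length ∧ s.getD i 0 == 1 then rssWhileOnes s (i + 1) else i
termination_by s.length - i
decreasing_by omega

-- facts about the port's own loops, cited by the outer loop's termination proof
theorem rssWhileOnes_ge (s : List Int) (i : Nat) : i ≤ rssWhileOnes s i := by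
  fun_induction rssWhileOnes s i with
  | case1 i h ih => omega
  | case2 i h => omega

theorem rssWhileOnes_gt (s : List Int) (i : Nat) (h1 : i < s.length)
    (h2 : s.getD i 0 == 1) : i < rssWhileOnes s i := by
  rw [rssWhileOnes, if_pos ⟨h1, h2⟩]
  have := rssWhileOnes_ge s (i + 1); omega

theorem rssWhileOnes_le (s : List Int) (i : Nat) (h : i ≤ s.length) :
    rssWhileOnes s i ≤ s.length := by
  fun_induction rssWhileOnes s i with
  | case1 i hc ih => exact ih (by omega)
  | case2 i hc => exact h

theorem rssLen_foldl_set (l : List Nat) (s : List Int) :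
    (l.foldl (fun t j => t.set j 0) s).length = s.length := by
  induction l generalizing s with
  | nil => rfl
  | cons a t ih => simp [List.foldl, ih]

-- outer while loop of A (state: the mutated list `smoothed` and index i);
-- `start` is i, `end` is rssWhileOnes s i, written inline
def rssLoop (s : List Int) (i : Nat) (md : Int) : List Int :=
  if hlt : i < s.length then
    if h1 : s.getD i 0 == 1 then
      rssLoop
        (if ((rssWhileOnes s i : Int) - (i : Int)) < md then
            (List.range' i (rssWhileOnes s i - i)).foldl (fun t j => t.set j 0) s
          else s)
        (rssWhileOnes s i) md
    else rssLoop s (i + 1) md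
  else s
termination_by s.length - i
decreasing_by
  · have hg := rssWhileOnes_gt s i hlt h1
    have hl := rssWhileOnes_le s i (le_of_lt hlt)
    split
    · rw [rssLen_foldl_set]; omega
    · omega
  · omega

def remove_short_spikes (preds : List Int) (min_duration : Int) : List Int :=
  rssLoop (preds) 0 min_duration

-- ===== PORT B =====
-- `runs[-1]` check-and-increment step of Source B's first loop
def rssRunStep (runs : List (Int × Nat)) (v : Int) : List (Int × Nat) :=
  if runs ≠ [] ∧ (runs.getLastD (0, 0)).1 == v then
    runs.dropLast ++ [((runs.getLastD (0, 0)).1, (runs.getLastD (0, 0)).2 + 1)]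
  else runs ++ [(v, 1)]

def remove_short_spikes_alt (preds : List Int) (min_duration : Int) : List Int :=
  let runs := preds.foldl rssRunStep []
  runs.foldl (fun out p =>
    out ++ (if p.1 == 1 ∧ (p.2 : Int) < min_duration then List.replicate p.2 0
            else List.replicate p.2 p.1)) []

-- ===== PRECONDITION & SPEC =====
def Spec_remove_short_spikes (preds : List Int) (min_duration : Int) (out : List Int) : Prop := out = remove_short_spikes_alt preds min_duration
instance (preds : List Int) (min_duration : Int) (out : List Int) : Decidable (Spec_remove_short_spikes preds min_duration out) := by unfold Spec_remove_short_spikes; infer_instance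

-- ===== CLAIM (what is proved, stated in full; the proofs are below) =====
def Claim_equal_remove_short_spikes : Prop := ∀ (preds : List Int) (min_duration : Int), Dom_remove_short_spikes preds min_duration → Spec_remove_short_spikes preds min_duration (remove_short_spikes preds min_duration)

-- ===== LEMMAS AND PROOFS =====

-- the decoding step of Source B's second loop, as a function of one run
def rssEmit (md : Int) (p : Int × Nat) : List Int :=
  if p.1 == 1 ∧ (p.2 : Int) < md then List.replicate p.2 0 else List.replicate p.2 p.1

theorem alt_eq_flatMap (xs : List Int) (md : Int) :
    remove_short_spikes_alt xs md = (xs.foldl rssRunStep []).flatMap (rssEmit md) := by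
  unfold remove_short_spikes_alt rssEmit
  exact PySem.List.foldl_append_eq_flatMap _ _ _

theorem runStep_ne_nil (runs : List (Int × Nat)) (v : Int) : rssRunStep runs v ≠ [] := by
  unfold rssRunStep
  split <;> simp

theorem runStep_append (a1 a2 : List (Int × Nat)) (v : Int) (h : a2 ≠ []) :
    rssRunStep (a1 ++ a2) v = a1 ++ rssRunStep a2 v := by
  unfold rssRunStep
  have hl : (a1 ++ a2).getLastD (0, 0) = a2.getLastD (0, 0) := by
    rw [List.getLastD_eq_getLast?, List.getLastD_eq_getLast?, List.getLast?_append]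
    cases h2 : a2.getLast? with
    | none => exact absurd (List.getLast?_eq_none_iff.mp h2) h
    | some p => rfl
  rw [hl]
  by_cases hc : ((a2.getLastD (0, 0)).1 == v : Bool)
  · rw [if_pos ⟨by simp [h], hc⟩, if_pos ⟨h, hc⟩,
      List.dropLast_append_of_ne_nil h, List.append_assoc]
  · rw [if_neg (by tauto), if_neg (by tauto), List.append_assoc]

theorem foldl_runStep_append (xs : List Int) (a1 a2 : List (Int × Nat)) (h : a2 ≠ []) :
    xs.foldl rssRunStep (a1 ++ a2) = a1 ++ xs.foldl rssRunStep a2 := by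
  induction xs generalizing a2 with
  | nil => rfl
  | cons v t ih =>
    simp only [List.foldl_cons, runStep_append a1 a2 v h]
    exact ih _ (runStep_ne_nil a2 v)

theorem foldl_runStep_replicate (j : Nat) (acc : List (Int × Nat)) (x : Int) (m : Nat) :
    (List.replicate j x).foldl rssRunStep (acc ++ [(x, m)]) = acc ++ [(x, m + j)] := by
  induction j generalizing m with
  | zero => rfl
  | succ j ih =>
    rw [List.replicate_succ, List.foldl_cons]
    have hstep : rssRunStep (acc ++ [(x, m)]) x = acc ++ [(x, m + 1)] := by
      unfold rssRunStep
      rw [if_pos ⟨by simp, by simp⟩]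
      simp
    rw [hstep, ih]
    congr 3
    omega

theorem runsOf_run (x : Int) (a : Nat) (rest : List Int)
    (hh : ∀ y, rest.head? = some y → ¬(y == x)) :
    (List.replicate (a + 1) x ++ rest).foldl rssRunStep [] =
      (x, a + 1) :: rest.foldl rssRunStep [] := by
  rw [List.replicate_succ, List.cons_append, List.foldl_cons]
  have h1 : rssRunStep [] x = [(x, 1)] := rfl
  rw [h1, List.foldl_append]
  have h2 : (List.replicate a x).foldl rssRunStep [(x, 1)] = [(x, a + 1)] := by
    have := foldl_runStep_replicate a [] x 1
    simpa [Nat.add_comm] using this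
  rw [h2]
  cases rest with
  | nil => rfl
  | cons y t =>
    have hy : ¬(y == x) := hh y rfl
    have hxy : ¬(x = y) := fun he => hy (by simp [he])
    have hstep : rssRunStep [(x, a + 1)] y = [(x, a + 1)] ++ [(y, 1)] := by
      simp [rssRunStep, hxy]
    rw [List.foldl_cons, hstep, foldl_runStep_append t _ _ (by simp)]
    rfl

theorem alt_run (x : Int) (a : Nat) (rest : List Int) (md : Int)
    (hh : ∀ y, rest.head? = some y → ¬(y == x)) :
    remove_short_spikes_alt (List.replicate (a + 1) x ++ rest) md =
      (if x == 1 ∧ ((a + 1 : Nat) : Int) < md then List.replicate (a + 1) 0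
       else List.replicate (a + 1) x) ++ remove_short_spikes_alt rest md := by
  rw [alt_eq_flatMap, alt_eq_flatMap, runsOf_run x a rest hh, List.flatMap_cons]
  simp [rssEmit]

-- run decomposition of a nonempty list at its head
theorem run_decomp (x : Int) (t : List Int) :
    (x :: t) = List.replicate ((t.takeWhile (· == x)).length + 1) x
        ++ t.dropWhile (· == x)
    ∧ t = List.replicate (t.takeWhile (· == x)).length x ++ t.dropWhile (· == x)
    ∧ (∀ y, (t.dropWhile (· == x)).head? = some y → ¬(y == x)) := by
  have hsplit : t = t.takeWhile (· == x) ++ t.dropWhile (· == x) :=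
    (List.takeWhile_append_dropWhile ..).symm
  have htw : t.takeWhile (· == x) = List.replicate (t.takeWhile (· == x)).length x :=
    List.eq_replicate_iff.mpr ⟨rfl, fun b hb => by
      simpa using List.mem_takeWhile_imp hb⟩
  refine ⟨?_, ?_, ?_⟩
  · rw [List.replicate_succ, List.cons_append]
    congr 1
    conv_lhs => rw [hsplit]
    rw [← htw]
  · conv_lhs => rw [hsplit]
    rw [← htw]
  · intro y hy
    have := List.head?_dropWhile_not (· == x) t
    rw [hy] at this
    simp only at this
    simp [this]

theorem alt_cons_ne (x : Int) (t : List Int) (md : Int) (hx : ¬(x == 1)) :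
    remove_short_spikes_alt (x :: t) md = x :: remove_short_spikes_alt t md := by
  obtain ⟨hdec1, hdec2, hh⟩ := run_decomp x t
  have h1 : remove_short_spikes_alt (x :: t) md
      = List.replicate ((t.takeWhile (· == x)).length + 1) x
          ++ remove_short_spikes_alt (t.dropWhile (· == x)) md := by
    conv_lhs => rw [hdec1]
    rw [alt_run x _ _ md hh, if_neg (by simp [hx])]
  cases ha : (t.takeWhile (· == x)).length with
  | zero =>
    have : t = t.dropWhile (· == x) := by
      conv_lhs => rw [hdec2]
      rw [ha]; rfl
    rw [h1, ha, ← this]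
    rfl
  | succ a =>
    have h2 : remove_short_spikes_alt t md
        = List.replicate (a + 1) x ++ remove_short_spikes_alt (t.dropWhile (· == x)) md := by
      conv_lhs => rw [hdec2, ha]
      rw [alt_run x a _ md hh]
      rw [if_neg (by simp [hx])]
    rw [h1, h2, ha, List.replicate_succ, List.cons_append]

theorem whileOnes_eq (s : List Int) (i : Nat) :
    rssWhileOnes s i = i + ((s.drop i).takeWhile (· == (1 : Int))).length := by
  fun_induction rssWhileOnes s i with
  | case1 i h ih =>
    obtain ⟨hlt, hone⟩ := h
    rw [ih, List.drop_eq_getElem_cons hlt, List.takeWhile_cons]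
    have : s[i] = s.getD i 0 := (List.getD_eq_getElem s 0 hlt).symm
    rw [this, if_pos hone]
    simp; omega
  | case2 i h =>
    by_cases hlt : i < s.length
    · have hone : ¬(s.getD i 0 == 1) := fun hc => h ⟨hlt, hc⟩
      rw [List.drop_eq_getElem_cons hlt, List.takeWhile_cons]
      have : s[i] = s.getD i 0 := (List.getD_eq_getElem s 0 hlt).symm
      rw [this, if_neg hone]
      simp
    · rw [List.drop_eq_nil_of_le (by omega)]; simp

theorem foldl_set_zero (k a : Nat) (s : List Int) (h : a + k ≤ s.length) :
    (List.range' a k).foldl (fun t j => t.set j 0) s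
      = s.take a ++ List.replicate k 0 ++ s.drop (a + k) := by
  induction k generalizing a s with
  | zero => simp
  | succ k ih =>
    rw [List.range'_succ, List.foldl_cons]
    have hlen : (s.set a 0).length = s.length := by simp
    rw [ih (a + 1) (s.set a 0) (by omega)]
    have hset : s.set a 0 = s.take a ++ 0 :: s.drop (a + 1) := by
      rw [List.set_eq_take_append_cons_drop, if_pos (by omega)]
    have hta : (s.take a).length = a := by simp; omega
    rw [hset]
    have h1 : (s.take a ++ 0 :: s.drop (a + 1)).take (a + 1)
        = s.take a ++ [0] := by
      rw [List.take_append, List.take_of_length_le (by simp), hta,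
        show a + 1 - a = 1 by omega]
      rfl
    have h2 : (s.take a ++ 0 :: s.drop (a + 1)).drop (a + 1 + k)
        = s.drop (a + (k + 1)) := by
      rw [List.drop_append, List.drop_eq_nil_of_le (by simp; omega), hta,
        List.nil_append, show a + 1 + k - a = k + 1 by omega,
        List.drop_succ_cons, List.drop_drop]
      congr 1
      omega
    rw [h1, h2, List.replicate_succ]
    simp

theorem rss_main (s : List Int) (i : Nat) (md : Int) :
    i ≤ s.length → rssLoop s i md = s.take i ++ remove_short_spikes_alt (s.drop i) md := by
  fun_induction rssLoop s i md with
  | case1 s i hlt h1 ih =>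
    intro h
    have hgi : s.getD i 0 = s[i] := List.getD_eq_getElem s 0 hlt
    have hx1 : s[i] = 1 := by rw [hgi] at h1; simpa using h1
    have hdropc : s.drop i = s[i] :: s.drop (i + 1) := List.drop_eq_getElem_cons hlt
    obtain ⟨hdec1, hdec2, hh⟩ := run_decomp (s[i]) (s.drop (i + 1))
    rw [← hdropc] at hdec1
    set a := ((s.drop (i + 1)).takeWhile (· == s[i])).length with hadef
    set rest := (s.drop (i + 1)).dropWhile (· == s[i]) with hrdef
    have hW : rssWhileOnes s i = i + (a + 1) := by
      rw [whileOnes_eq s i, hdropc, hx1, List.takeWhile_cons]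
      simp [hadef, hx1]
    have halen : a + 1 ≤ s.length - i := by
      have := congrArg List.length hdec1
      simp at this; omega
    have hdrop_ik : s.drop (i + (a + 1)) = rest := by
      have h' : s.drop (i + (a + 1)) = (s.drop i).drop (a + 1) := by
        rw [List.drop_drop]; try ring_nf
      rw [h', hdec1, List.drop_append_of_le_length (by simp), List.drop_replicate]
      simp
    have htake_ik : s.take (i + (a + 1)) = s.take i ++ List.replicate (a + 1) s[i] := by
      rw [List.take_add, hdec1, List.take_append_of_le_length (by simp),
        List.take_replicate]
      simp
    rw [hW] at ih ⊢
    by_cases hc : ((i + (a + 1) : Nat) : Int) - (i : Int) < md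
    · have hc' : ((a + 1 : Nat) : Int) < md := by push_cast at hc ⊢; omega
      have hset : (List.range' i (i + (a + 1) - i)).foldl (fun t j => t.set j 0) s
          = s.take i ++ List.replicate (a + 1) 0 ++ s.drop (i + (a + 1)) := by
        rw [show i + (a + 1) - i = a + 1 by omega]
        exact foldl_set_zero (a + 1) i s (by omega)
      simp only [dif_pos hc, if_pos hc, hset] at ih ⊢
      set s' := s.take i ++ List.replicate (a + 1) 0 ++ s.drop (i + (a + 1)) with hs'
      have hti : (s.take i).length = i := by simp; omega
      have hts' : s'.take (i + (a + 1)) = s.take i ++ List.replicate (a + 1) 0 := by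
        rw [hs', List.append_assoc,
          show i + (a + 1) = (s.take i).length + (a + 1) by omega, List.take_append]
        rw [List.take_append_of_le_length (by simp), List.take_replicate]
        simp
      have hds' : s'.drop (i + (a + 1)) = s.drop (i + (a + 1)) := by
        rw [hs', List.append_assoc,
          show i + (a + 1) = (s.take i).length + (a + 1) by omega, List.drop_append]
        rw [List.drop_append_of_le_length (by simp), List.drop_replicate]
        simp
      rw [ih (by rw [hs']; simp; omega), hts', hds', hdrop_ik]
      conv_rhs => rw [hdec1, hx1]
      rw [alt_run 1 a rest md (hx1 ▸ hh),
        if_pos ⟨by simp, by exact_mod_cast hc'⟩]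
      simp
    · simp only [dif_neg hc, if_neg hc] at ih ⊢
      rw [ih (by omega), htake_ik, hdrop_ik]
      conv_rhs => rw [hdec1, hx1]
      rw [alt_run 1 a rest md (hx1 ▸ hh),
        if_neg (by
          rintro ⟨-, h2⟩
          apply hc
          push_cast at h2 ⊢
          omega)]
      simp [hx1]
  | case2 s i hlt h1 ih =>
    intro h
    have hgi : s.getD i 0 = s[i] := List.getD_eq_getElem s 0 hlt
    have hdropc : s.drop i = s[i] :: s.drop (i + 1) := List.drop_eq_getElem_cons hlt
    have htake : s.take (i + 1) = s.take i ++ [s[i]] := by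
      rw [List.take_add_one]
      simp [List.getElem?_eq_getElem hlt]
    rw [ih (by omega), hdropc,
      alt_cons_ne s[i] (s.drop (i + 1)) md (by rw [hgi] at h1; simpa using h1)]
    rw [htake, List.append_assoc, List.singleton_append]
  | case3 s i hlt =>
    intro h
    rw [List.drop_eq_nil_of_le (by omega), List.take_of_length_le (by omega)]
    have : remove_short_spikes_alt [] md = [] := rfl
    rw [this, List.append_nil]

-- ===== VERDICT (by name: the statement is the Claim_ definition above) =====
theorem remove_short_spikes_spec : Claim_equal_remove_short_spikes := by
  intro preds md _
  unfold Spec_remove_short_spikes remove_short_spikes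
  simpa using rss_main preds 0 md (by omega)
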